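-- pv_equiv track=rewrite | github.com/VladiMihtarski/mytestprogram | 06_Favorite_Movie_with_def..py | calculate_ascii_sum
-- ===== SOURCE A (Python) =====
-- def calculate_ascii_sum(movie_title):
--     movie_sum = 0
--     title_length = len(movie_title)
--
--     for c in movie_title:
--         if c.islower():
--             movie_sum += ord(c) - (2 * title_length)
--         elif c.isupper():
--             movie_sum += ord(c) - title_length
--         else:
--             movie_sum += ord(c)
--
--     return movie_sum
-- ===== SOURCE B (Python) =====
-- def calculate_ascii_sum(movie_title):
--     total = sum(ord(c) for c in movie_title)
--     lower_count = sum(1 for c in movie_title if c.islower())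
--     upper_count = sum(1 for c in movie_title if c.isupper())
--     return total - len(movie_title) * (2 * lower_count + upper_count)
-- ===== Notes on version B (the rewrite author's own statement) =====
-- stated objective: alternative
-- what changed: Replaces the per-character branching accumulation with three aggregates (ord total, lowercase count, uppercase count) combined by the closed-form total - len*(2*lower_count + upper_count).
import Mathlib
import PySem

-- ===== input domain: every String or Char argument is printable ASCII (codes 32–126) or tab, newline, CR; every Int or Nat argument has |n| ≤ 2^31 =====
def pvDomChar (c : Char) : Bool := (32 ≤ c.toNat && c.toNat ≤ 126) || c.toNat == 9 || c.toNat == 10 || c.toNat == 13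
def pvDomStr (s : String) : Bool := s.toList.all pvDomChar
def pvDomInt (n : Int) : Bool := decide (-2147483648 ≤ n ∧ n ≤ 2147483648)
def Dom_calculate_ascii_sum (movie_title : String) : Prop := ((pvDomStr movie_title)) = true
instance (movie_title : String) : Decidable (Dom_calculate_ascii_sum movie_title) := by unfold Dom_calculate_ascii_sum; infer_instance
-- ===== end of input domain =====

-- ===== PORT A =====
-- fold over the characters, subtracting 2*len / len for lower/upper case, as in A
def calculate_ascii_sum (movie_title : String) : Int :=
  let title_length : Int := PySem.Str.len movie_title
  movie_title.toList.foldl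
    (fun movie_sum c =>
      if PySem.Chars.islower c then movie_sum + ((c.toNat : Int) - 2 * title_length)
      else if PySem.Chars.isupper c then movie_sum + ((c.toNat : Int) - title_length)
      else movie_sum + (c.toNat : Int)) 0

-- ===== PORT B =====
-- B changes the decomposition: three aggregates and one closed-form combination (objective: alternative)
def calculate_ascii_sum_alt (movie_title : String) : Int :=
  let total : Int := (movie_title.toList.map (fun c => (c.toNat : Int))).sum
  let lower_count : Int := (movie_title.toList.filter (fun c => PySem.Chars.islower c)).length
  let upper_count : Int := (movie_title.toList.filter (fun c => PySem.Chars.isupper c)).length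
  total - PySem.Str.len movie_title * (2 * lower_count + upper_count)

-- ===== PRECONDITION & SPEC =====
def Spec_calculate_ascii_sum (movie_title : String) (out : Int) : Prop := out = calculate_ascii_sum_alt movie_title
instance (movie_title : String) (out : Int) : Decidable (Spec_calculate_ascii_sum movie_title out) := by unfold Spec_calculate_ascii_sum; infer_instance

-- ===== CLAIM (what is proved, stated in full; the proofs are below) =====
def Claim_equal_calculate_ascii_sum : Prop := ∀ (movie_title : String), Dom_calculate_ascii_sum movie_title → Spec_calculate_ascii_sum movie_title (calculate_ascii_sum movie_title)

-- ===== LEMMAS AND PROOFS =====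
theorem islower_not_isupper (c : Char) (h : PySem.Chars.islower c = true) :
    PySem.Chars.isupper c = false := by
  simp only [PySem.Chars.islower, Bool.and_eq_true, decide_eq_true_eq] at h
  unfold PySem.Chars.isupper
  simp only [Bool.and_eq_false_iff, decide_eq_false_iff_not]
  by_cases hZ : c ≤ 'Z'
  · exact absurd (le_trans h.1 hZ) (by decide)
  · exact Or.inr hZ

theorem loop_closed (L : Int) (l : List Char) (acc : Int) :
    l.foldl
      (fun movie_sum c =>
        if PySem.Chars.islower c then movie_sum + ((c.toNat : Int) - 2 * L)
        else if PySem.Chars.isupper c then movie_sum + ((c.toNat : Int) - L)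
        else movie_sum + (c.toNat : Int)) acc
    = acc + (l.map (fun c => (c.toNat : Int))).sum
        - L * (2 * ((l.filter (fun c => PySem.Chars.islower c)).length : Int)
               + ((l.filter (fun c => PySem.Chars.isupper c)).length : Int)) := by
  induction l generalizing acc with
  | nil => simp
  | cons c t ih =>
    by_cases hl : PySem.Chars.islower c
    · simp [List.foldl_cons, hl, islower_not_isupper c hl, ih]; ring
    · by_cases hu : PySem.Chars.isupper c
      · simp [List.foldl_cons, hl, hu, ih]; ring
      · simp [List.foldl_cons, hl, hu, ih]; ring

-- ===== VERDICT (by name: the statement is the Claim_ definition above) =====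
theorem calculate_ascii_sum_spec : Claim_equal_calculate_ascii_sum := by
  intro s _
  unfold Spec_calculate_ascii_sum calculate_ascii_sum calculate_ascii_sum_alt
  simp only [loop_closed]
  ring
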